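-- pv_equiv track=rewrite | github.com/KaiaWalters/codeWar | printerErrors.py | printer_error
-- ===== SOURCE A (Python) =====
-- def printer_error(s):
--   #loop through a string.
--   #turn string into an array of letters
--   #check to see if that letter is ok or not
--   #count how many not ok letters are in the given string
--   count=0
--   total=len(s)
--   forbidden=["n","o","p","q","r","s","t","u","v","w","x","y","z"]
--
--   for i in s:
--     for j in forbidden:
--       if j == i:
--         count+=1
--
--   return (f'{count}/{total}')
-- ===== SOURCE B (Python) =====
-- def printer_error(s):
--     freq = {}
--     for ch in s:
--         freq[ch] = freq.get(ch, 0) + 1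
--     count = sum(freq.get(ch, 0) for ch in "nopqrstuvwxyz")
--     return f"{count}/{len(s)}"
-- ===== Notes on version B (the rewrite author's own statement) =====
-- stated objective: faster
-- what changed: Replaces the nested per-character scan over the 13-element forbidden list with a single-pass frequency dict followed by a sum of the 13 forbidden letters' counts.
import Mathlib
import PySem

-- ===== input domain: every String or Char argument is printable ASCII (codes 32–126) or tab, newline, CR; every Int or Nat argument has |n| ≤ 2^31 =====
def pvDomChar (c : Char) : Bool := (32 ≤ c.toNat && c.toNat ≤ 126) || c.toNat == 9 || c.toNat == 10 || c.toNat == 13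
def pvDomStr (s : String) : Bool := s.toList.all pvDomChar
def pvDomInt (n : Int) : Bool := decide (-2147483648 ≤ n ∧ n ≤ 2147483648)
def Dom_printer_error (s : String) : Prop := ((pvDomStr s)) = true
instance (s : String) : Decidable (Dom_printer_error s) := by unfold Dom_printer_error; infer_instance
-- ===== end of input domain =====

-- B replaces A's nested per-character scan of the forbidden list with a one-pass
-- frequency dict plus a sum over the 13 forbidden letters (alternative decomposition).

-- ===== PORT A =====
def pvForbidden : List Char := ['n','o','p','q','r','s','t','u','v','w','x','y','z']

def printer_error (s : String) : String :=
  let total : Int := s.toList.length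
  let count : Int :=
    s.toList.foldl (fun c i => pvForbidden.foldl (fun c j => if j = i then c + 1 else c) c) 0
  PySem.Int.toStr count ++ "/" ++ PySem.Int.toStr total

-- ===== PORT B =====
def printer_error_alt (s : String) : String :=
  let freq : PySem.Dict Char Int :=
    s.toList.foldl (fun d ch => d.insert ch (d.getD ch 0 + 1)) PySem.Dict.empty
  let count : Int :=
    ("nopqrstuvwxyz".toList).foldl (fun acc ch => acc + freq.getD ch 0) 0
  PySem.Int.toStr count ++ "/" ++ PySem.Int.toStr (s.toList.length : Int)

-- ===== PRECONDITION & SPEC =====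
def Spec_printer_error (s : String) (out : String) : Prop := out = printer_error_alt s
instance (s : String) (out : String) : Decidable (Spec_printer_error s out) := by unfold Spec_printer_error; infer_instance

-- ===== CLAIM (what is proved, stated in full; the proofs are below) =====
def Claim_equal_printer_error : Prop := ∀ (s : String), Dom_printer_error s → Spec_printer_error s (printer_error s)

-- ===== LEMMAS AND PROOFS =====

-- A's inner loop over the forbidden list adds the number of occurrences of i in it.
lemma inner_foldl (F : List Char) (i : Char) (c : Int) :
    F.foldl (fun c j => if j = i then c + 1 else c) c = c + (F.count i : Int) := by
  induction F generalizing c with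
  | nil => simp
  | cons x xs ih =>
      rw [List.foldl_cons, ih]
      by_cases h : x = i
      · subst h
        simp
        ring
      · simp [h]

-- A's outer loop sums forbidden-counts over the characters of the string.
lemma outer_foldl (F : List Char) (l : List Char) (c : Int) :
    l.foldl (fun c i => F.foldl (fun c j => if j = i then c + 1 else c) c) c
      = c + (l.map (fun i => (F.count i : Int))).sum := by
  induction l generalizing c with
  | nil => simp
  | cons x xs ih =>
      rw [List.foldl_cons, inner_foldl, ih, List.map_cons, List.sum_cons]
      ring

-- Summing an indicator over ys counts the occurrences of x in ys.
lemma sum_ite_eq_count (x : Char) (ys : List Char) :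
    (ys.map (fun i => if x = i then (1:Int) else 0)).sum = (ys.count x : Int) := by
  induction ys with
  | nil => simp
  | cons y ys ih =>
      simp only [List.map_cons, List.sum_cons, List.count_cons, ih]
      by_cases h : x = y
      · simp [h]
        omega
      · have hb : (y == x) = false := beq_eq_false_iff_ne.mpr (Ne.symm h)
        simp [h, hb]

-- Counting in a list with one more element, summed over F.
lemma map_count_cons (F : List Char) (x : Char) (xs : List Char) :
    (F.map (fun j => ((x :: xs).count j : Int))).sum
      = (F.map (fun j => (xs.count j : Int))).sum + (F.count x : Int) := by
  induction F with
  | nil => simp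
  | cons y ys ihF =>
      by_cases hy : y = x
      · subst hy
        simp [List.count_cons, sum_ite_eq_count]
        ring
      · have hb : (y == x) = false := beq_eq_false_iff_ne.mpr hy
        have hxy : ¬ x = y := fun h => hy h.symm
        simp [List.count_cons, hb, hxy, sum_ite_eq_count]
        ring

-- Double-counting: summing over the string then the forbidden list equals the reverse.
lemma sum_count_comm (F : List Char) (l : List Char) :
    (l.map (fun i => (F.count i : Int))).sum = (F.map (fun j => (l.count j : Int))).sum := by
  induction l with
  | nil => simp
  | cons x xs ih =>
      simp [List.map_cons, ih, map_count_cons]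
      ring

-- ===== VERDICT (by name: the statement is the Claim_ definition above) =====
theorem printer_error_spec : Claim_equal_printer_error := by
  intro s _
  show printer_error s = printer_error_alt s
  simp only [printer_error, printer_error_alt,
    PySem.Dict.foldl_insert_getD_add_one_eq_counter,
    PySem.Dict.getD_counter, outer_foldl]
  have hF : "nopqrstuvwxyz".toList = pvForbidden := by decide
  rw [hF, PySem.List.foldl_add (g := fun ch => ((s.toList.count ch : Int))),
    sum_count_comm pvForbidden s.toList]
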